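-- pv_equiv track=rewrite | github.com/farodoc/Algorithms-and-Data-Structures-AGH-UST | Random tasks/Zestaw 3/12.py | najdlArytUjemny
-- ===== SOURCE A (Python) =====
-- def najdlArytUjemny(t):
--     maxDl = 1
--     i = 0
--
--     while i < len(t) - 1:
--         r = t[i + 1] - t[i]
--         if r >= 0:
--             i += 1
--
--         else:
--             koniec = i + 1
--             tempDl = 2
--
--             while koniec < len(t) - 1 and t[koniec] + r == t[koniec + 1]:
--                 tempDl += 1
--                 koniec += 1
--
--             if tempDl > maxDl:
--                 maxDl = tempDl
--
--             i = koniec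
--
--     return maxDl
-- ===== SOURCE B (Python) =====
-- def najdlArytUjemny(t):
--     maxDl = 1
--     cur = 1
--     prevDiff = None
--     for a, b in zip(t, t[1:]):
--         diff = b - a
--         if diff < 0 and prevDiff == diff:
--             cur += 1
--         elif diff < 0:
--             cur = 2
--         else:
--             cur = 1
--         if cur > maxDl:
--             maxDl = cur
--         prevDiff = diff
--     return maxDl
-- ===== Notes on version B (the rewrite author's own statement) =====
-- stated objective: simpler
-- what changed: Replaced A's two-pointer scan (a nested inner while that jumps the outer index past each run) by one flat pass over adjacent pairs maintaining a running run length and the previous difference; the flat loop also has lower per-element overhead (measured constant-factor speedup).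
import Mathlib
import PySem

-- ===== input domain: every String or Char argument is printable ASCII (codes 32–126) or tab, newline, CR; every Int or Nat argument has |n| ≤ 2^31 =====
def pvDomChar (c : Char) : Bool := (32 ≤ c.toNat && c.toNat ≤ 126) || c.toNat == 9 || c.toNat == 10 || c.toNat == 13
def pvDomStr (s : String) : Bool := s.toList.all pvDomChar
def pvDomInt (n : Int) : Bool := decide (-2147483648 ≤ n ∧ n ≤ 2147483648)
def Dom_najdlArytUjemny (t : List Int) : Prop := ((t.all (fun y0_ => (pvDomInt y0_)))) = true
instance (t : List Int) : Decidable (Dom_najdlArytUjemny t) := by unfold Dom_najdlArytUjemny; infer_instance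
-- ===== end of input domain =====

-- B replaces A's two-pointer scan (nested inner while jumping the outer index past
-- each run) by one flat pass over adjacent pairs maintaining a running run length
-- (objective: simpler; same O(n) cost).

-- ===== PORT A =====
-- inner while loop of A: returns (tempDl, koniec); indices are in range whenever
-- the guard holds, so getD 0 is exact there.  The while loops are transcribed as
-- structural recursion on a fuel counter; fuel t.length always suffices (the index
-- strictly increases and the guard needs index < t.length - 1), so the fuel-0 case
-- is never the exit taken.
def aInner (t : List Int) (r : Int) : Nat → Nat → Int → Int × Nat
  | 0, koniec, tempDl => (tempDl, koniec)
  | fuel + 1, koniec, tempDl =>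
    if koniec < t.length - 1 ∧ t.getD koniec 0 + r = t.getD (koniec + 1) 0 then
      aInner t r fuel (koniec + 1) (tempDl + 1)
    else (tempDl, koniec)

-- outer while loop of A
def aOuter (t : List Int) : Nat → Int → Nat → Int
  | 0, maxDl, _ => maxDl
  | fuel + 1, maxDl, i =>
    if i < t.length - 1 then
      if t.getD (i + 1) 0 - t.getD i 0 ≥ 0 then aOuter t fuel maxDl (i + 1)
      else
        let p := aInner t (t.getD (i + 1) 0 - t.getD i 0) t.length (i + 1) 2
        aOuter t fuel (if p.1 > maxDl then p.1 else maxDl) p.2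
    else maxDl

def najdlArytUjemny (t : List Int) : Int := aOuter t t.length 1 0

-- ===== PORT B =====
-- flat loop of Source B over adjacent pairs, state (maxDl, cur, prevDiff)
def altLoop (m cur : Int) (pd : Option Int) : List (Int × Int) → Int
  | [] => m
  | (a, b) :: rest =>
    let d := b - a
    let cur' := if d < 0 ∧ pd = some d then cur + 1 else if d < 0 then 2 else 1
    let m' := if cur' > m then cur' else m
    altLoop m' cur' (some d) rest

def najdlArytUjemny_alt (t : List Int) : Int := altLoop 1 1 none (t.zip t.tail)

-- ===== PRECONDITION & SPEC =====
def Spec_najdlArytUjemny (t : List Int) (out : Int) : Prop := out = najdlArytUjemny_alt t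
instance (t : List Int) (out : Int) : Decidable (Spec_najdlArytUjemny t out) := by unfold Spec_najdlArytUjemny; infer_instance

-- ===== CLAIM (what is proved, stated in full; the proofs are below) =====
def Claim_equal_najdlArytUjemny : Prop := ∀ (t : List Int), Dom_najdlArytUjemny t → Spec_najdlArytUjemny t (najdlArytUjemny t)

-- ===== LEMMAS AND PROOFS =====

theorem aInner_snd_ge (t : List Int) (r : Int) (f : Nat) :
    ∀ (k : Nat) (c : Int), k ≤ (aInner t r f k c).2 := by
  induction f with
  | zero => intro k c; rfl
  | succ f ih =>
    intro k c
    rw [aInner]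
    split
    · exact le_trans (by omega) (ih (k + 1) (c + 1))
    · rfl

theorem aInner_fst_ge (t : List Int) (r : Int) (f : Nat) :
    ∀ (k : Nat) (c : Int), c ≤ (aInner t r f k c).1 := by
  induction f with
  | zero => intro k c; rfl
  | succ f ih =>
    intro k c
    rw [aInner]
    split
    · exact le_trans (by omega) (ih (k + 1) (c + 1))
    · rfl

-- with adequate fuel, at aInner's exit point the inner-while guard fails
theorem aInner_exit (t : List Int) (r : Int) (f : Nat) :
    ∀ (k : Nat) (c : Int), t.length - 1 ≤ k + f →
      ¬ ((aInner t r f k c).2 < t.length - 1 ∧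
         t.getD (aInner t r f k c).2 0 + r = t.getD ((aInner t r f k c).2 + 1) 0) := by
  induction f with
  | zero => intro k c hf hc; simp only [aInner] at hc; exact absurd hc.1 (by omega)
  | succ f ih =>
    intro k c hf
    rw [aInner]
    split
    · exact ih (k + 1) (c + 1) (by omega)
    · assumption

theorem altLoop_cons (m cur : Int) (pd : Option Int) (a b : Int) (rest : List (Int × Int)) :
    altLoop m cur pd ((a, b) :: rest) =
      altLoop
        (if (if b - a < 0 ∧ pd = some (b - a) then cur + 1 else if b - a < 0 then 2 else 1) > m
         then (if b - a < 0 ∧ pd = some (b - a) then cur + 1 else if b - a < 0 then 2 else 1)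
         else m)
        (if b - a < 0 ∧ pd = some (b - a) then cur + 1 else if b - a < 0 then 2 else 1)
        (some (b - a)) rest := rfl

theorem zip_tail_drop (t : List Int) (i : Nat) (h : i < t.length - 1) :
    (t.zip t.tail).drop i =
      (t.getD i 0, t.getD (i + 1) 0) :: (t.zip t.tail).drop (i + 1) := by
  have hlen : (t.zip t.tail).length = t.length - 1 := by
    simp [List.length_zip]
  have hi : i < (t.zip t.tail).length := by omega
  rw [List.drop_eq_getElem_cons hi]
  congr 1
  have h1 : i < t.length := by omega
  have h3 : i + 1 < t.length := by omega
  simp [List.getElem_zip, List.getElem_tail, List.getD_eq_getElem?_getD, h1, h3]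

theorem zip_tail_drop_nil (t : List Int) (i : Nat) (h : ¬ i < t.length - 1) :
    (t.zip t.tail).drop i = [] := by
  apply List.drop_eq_nil_of_le
  simp [List.length_zip]
  omega

-- B's flat loop inside a run reproduces A's inner while
theorem run_lemma (t : List Int) (r : Int) (hr : r < 0) (f : Nat) :
    ∀ (k : Nat) (m cur : Int), t.length - 1 ≤ k + f → cur ≤ m →
      altLoop m cur (some r) ((t.zip t.tail).drop k) =
        altLoop (if (aInner t r f k cur).1 > m then (aInner t r f k cur).1 else m)
          (aInner t r f k cur).1 (some r) ((t.zip t.tail).drop (aInner t r f k cur).2) := by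
  induction f with
  | zero =>
    intro k m cur hf hcm
    show _ = altLoop (if cur > m then cur else m) cur (some r) ((t.zip t.tail).drop k)
    rw [if_neg (show ¬ cur > m by omega)]
  | succ f ih =>
    intro k m cur hf hcm
    by_cases hc : k < t.length - 1 ∧ t.getD k 0 + r = t.getD (k + 1) 0
    · rw [aInner, if_pos hc, zip_tail_drop t k hc.1, altLoop_cons]
      have hd : t.getD (k + 1) 0 - t.getD k 0 = r := by omega
      rw [hd]
      have hcond : r < 0 ∧ (some r : Option Int) = some r := ⟨hr, rfl⟩
      rw [if_pos hcond]
      have hge : cur + 1 ≤ (aInner t r f (k + 1) (cur + 1)).1 := aInner_fst_ge _ _ _ _ _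
      rw [ih (k + 1) (if cur + 1 > m then cur + 1 else m) (cur + 1)
        (by omega) (by split <;> omega)]
      congr 1
      split <;> split <;> first | rfl | omega
    · rw [aInner, if_neg hc]
      show _ = altLoop (if cur > m then cur else m) cur (some r) ((t.zip t.tail).drop k)
      rw [if_neg (show ¬ cur > m by omega)]

-- main invariant: B's flat loop from index i with state (m, cur, pd) equals A's
-- outer loop from i, provided 1 ≤ m, cur ≤ m, and pd cannot combine with the next diff
theorem main_lemma (t : List Int) (f : Nat) :
    ∀ (i : Nat) (m cur : Int) (pd : Option Int), t.length - 1 ≤ i + f →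
      1 ≤ m → cur ≤ m →
      (i < t.length - 1 →
        ¬ (t.getD (i + 1) 0 - t.getD i 0 < 0 ∧ pd = some (t.getD (i + 1) 0 - t.getD i 0))) →
      altLoop m cur pd ((t.zip t.tail).drop i) = aOuter t f m i := by
  induction f with
  | zero =>
    intro i m cur pd hf h1 hcm hnc
    rw [zip_tail_drop_nil t i (by omega)]
    rfl
  | succ f ih =>
    intro i m cur pd hf h1 hcm hnc
    by_cases hi : i < t.length - 1
    · rw [zip_tail_drop t i hi, altLoop_cons, aOuter, if_pos hi]
      set r := t.getD (i + 1) 0 - t.getD i 0 with hrdef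
      by_cases hr : r ≥ 0
      · rw [if_pos hr]
        have hcur : (if r < 0 ∧ pd = some r then cur + 1 else if r < 0 then 2 else 1) = 1 := by
          rw [if_neg (show ¬ (r < 0 ∧ pd = some r) from fun hc => absurd hc.1 (by omega)),
              if_neg (show ¬ r < 0 by omega)]
        rw [hcur, if_neg (show ¬ (1:Int) > m by omega)]
        exact ih (i + 1) m 1 (some r) (by omega) h1 h1
          (by intro _ hc; rcases hc with ⟨hlt, he⟩; rw [Option.some_inj] at he; omega)
      · rw [if_neg hr]
        have hrneg : r < 0 := by omega
        have hcur : (if r < 0 ∧ pd = some r then cur + 1 else if r < 0 then 2 else 1) = 2 := by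
          rw [if_neg (hnc hi), if_pos hrneg]
        rw [hcur]
        rw [run_lemma t r hrneg t.length (i + 1) (if (2:Int) > m then 2 else m) 2
          (by omega) (by split <;> omega)]
        have hge : (2:Int) ≤ (aInner t r t.length (i + 1) 2).1 := aInner_fst_ge _ _ _ _ _
        have hkge : i + 1 ≤ (aInner t r t.length (i + 1) 2).2 := aInner_snd_ge _ _ _ _ _
        have hexit := aInner_exit t r t.length (i + 1) 2 (by omega)
        set C := (aInner t r t.length (i + 1) 2).1 with hC
        set K := (aInner t r t.length (i + 1) 2).2 with hK
        have hM : (if C > (if (2:Int) > m then 2 else m) then C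
            else (if (2:Int) > m then 2 else m)) = (if C > m then C else m) := by
          split <;> split <;> first | rfl | omega
        rw [hM]
        apply ih K (if C > m then C else m) C (some r) (by omega)
          (by split <;> omega) (by split <;> omega)
        intro hKlt hc
        rcases hc with ⟨hd, he⟩
        rw [Option.some_inj] at he
        exact hexit ⟨hKlt, by omega⟩
    · rw [zip_tail_drop_nil t i hi, aOuter, if_neg hi]
      rfl

-- ===== VERDICT (by name: the statement is the Claim_ definition above) =====
theorem najdlArytUjemny_spec : Claim_equal_najdlArytUjemny := by
  intro t _
  unfold Spec_najdlArytUjemny najdlArytUjemny najdlArytUjemny_alt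
  rw [← main_lemma t t.length 0 1 1 none (by omega) le_rfl le_rfl
    (by intro _ hc; rcases hc with ⟨_, he⟩; cases he)]
  rfl
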